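-- pv_equiv track=rewrite | github.com/valek228123/TMS_Homework | tasks_from_book.py | check_if_string_is_happy
-- ===== SOURCE A (Python) =====
-- def check_if_string_is_happy(input_str: str) -> bool:
--     for i in range(2, len(input_str)):
--         if (input_str[i] != input_str[i - 1] and
--                 input_str[i - 1] != input_str[i - 2] and
--                 input_str[i] != input_str[i - 2]):
--             continue
--         else:
--             return False
--     return True
-- ===== SOURCE B (Python) =====
-- def check_if_string_is_happy(input_str: str) -> bool:
--     if len(input_str) < 3:
--         return True
--     return (all(a != b for a, b in zip(input_str, input_str[1:])) and
--             all(a != b for a, b in zip(input_str, input_str[2:])))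
-- ===== Notes on version B (the rewrite author's own statement) =====
-- stated objective: idiomatic
-- what changed: Replaces A's single indexed loop testing each 3-char window's combined condition with a short-string guard plus two independent zip-based all() scans (no adjacent duplicates, no duplicates at distance 2).
import Mathlib
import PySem

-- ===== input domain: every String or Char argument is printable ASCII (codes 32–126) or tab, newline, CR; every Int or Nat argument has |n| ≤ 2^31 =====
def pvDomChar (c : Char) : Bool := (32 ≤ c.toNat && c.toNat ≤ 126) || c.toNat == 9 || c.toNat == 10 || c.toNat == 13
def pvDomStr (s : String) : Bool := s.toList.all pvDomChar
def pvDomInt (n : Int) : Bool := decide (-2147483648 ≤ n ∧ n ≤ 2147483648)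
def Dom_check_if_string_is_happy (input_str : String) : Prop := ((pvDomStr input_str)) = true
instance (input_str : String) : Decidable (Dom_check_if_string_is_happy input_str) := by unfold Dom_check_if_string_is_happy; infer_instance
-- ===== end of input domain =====

-- B replaces A's indexed 3-char-window loop by a length guard plus two independent
-- zip scans (adjacent pairs and distance-2 pairs); same value everywhere, no faster.

-- ===== PORT A =====
-- the loop body's condition on index i (Python's s[i] != s[i-1] and s[i-1] != s[i-2] and s[i] != s[i-2])
def pvWinA (cs : List Char) (i : Int) : Bool :=
  decide (PySem.List.pyGetD cs i ' ' ≠ PySem.List.pyGetD cs (i - 1) ' ') &&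
  decide (PySem.List.pyGetD cs (i - 1) ' ' ≠ PySem.List.pyGetD cs (i - 2) ' ') &&
  decide (PySem.List.pyGetD cs i ' ' ≠ PySem.List.pyGetD cs (i - 2) ' ')

-- the for-loop with its early 'return False'
def pvLoopA (cs : List Char) : List Int → Bool
  | [] => true
  | i :: rest => if pvWinA cs i then pvLoopA cs rest else false

def pvA (cs : List Char) : Bool :=
  pvLoopA cs (PySem.List.pyRange 2 (cs.length : Int) 1)

def check_if_string_is_happy (input_str : String) : Bool :=
  pvA input_str.toList

-- ===== PORT B =====
def pvB (cs : List Char) : Bool :=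
  if cs.length < 3 then true
  else ((cs.zip (cs.drop 1)).all fun p => p.1 ≠ p.2) &&
       ((cs.zip (cs.drop 2)).all fun p => p.1 ≠ p.2)

def check_if_string_is_happy_alt (input_str : String) : Bool :=
  pvB input_str.toList

-- ===== PRECONDITION & SPEC =====
def Spec_check_if_string_is_happy (input_str : String) (out : Bool) : Prop := out = check_if_string_is_happy_alt input_str
instance (input_str : String) (out : Bool) : Decidable (Spec_check_if_string_is_happy input_str out) := by unfold Spec_check_if_string_is_happy; infer_instance

-- ===== CLAIM (what is proved, stated in full; the proofs are below) =====
def Claim_equal_check_if_string_is_happy : Prop := ∀ (input_str : String), Dom_check_if_string_is_happy input_str → Spec_check_if_string_is_happy input_str (check_if_string_is_happy input_str)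

-- ===== LEMMAS AND PROOFS =====

-- A's loop with early return equals a Bool 'all' over the index list
theorem pvLoopA_eq_all (cs : List Char) (l : List Int) :
    pvLoopA cs l = l.all (pvWinA cs) := by
  induction l with
  | nil => rfl
  | cons i rest ih =>
    by_cases h : pvWinA cs i = true <;> simp [pvLoopA, h, ih]

-- A's value, index-free characterization
theorem portA_iff (cs : List Char) :
    pvA cs = true ↔
      ∀ k : Nat, k + 2 < cs.length →
        cs.getD (k + 2) ' ' ≠ cs.getD (k + 1) ' ' ∧
        cs.getD (k + 1) ' ' ≠ cs.getD k ' ' ∧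
        cs.getD (k + 2) ' ' ≠ cs.getD k ' ' := by
  unfold pvA
  rw [pvLoopA_eq_all, PySem.List.pyRange_one, List.all_map, List.all_eq_true]
  have e1 : ∀ k : Nat, ((k + 2 : Nat) : Int) - 1 = ((k + 1 : Nat) : Int) := by intro k; push_cast; ring
  have e2 : ∀ k : Nat, ((k + 2 : Nat) : Int) - 2 = ((k : Nat) : Int) := by intro k; push_cast; ring
  constructor
  · intro h k hk
    have hmem : k ∈ List.range (((cs.length : Int) - 2)).toNat := by
      simp [List.mem_range]; omega
    have := h k hmem
    simp only [Function.comp, pvWinA, Bool.and_eq_true, decide_eq_true_eq] at this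
    have e0 : (2 + (k : Int)) = ((k + 2 : Nat) : Int) := by push_cast; ring
    rw [e0, e1, e2] at this
    simp only [PySem.List.pyGetD_natCast] at this
    exact ⟨this.1.1, this.1.2, this.2⟩
  · intro h k hmem
    simp only [List.mem_range] at hmem
    have hk : k + 2 < cs.length := by omega
    have := h k hk
    simp only [Function.comp, pvWinA, Bool.and_eq_true, decide_eq_true_eq]
    have e0 : (2 + (k : Int)) = ((k + 2 : Nat) : Int) := by push_cast; ring
    rw [e0, e1, e2]
    simp only [PySem.List.pyGetD_natCast]
    exact ⟨⟨this.1, this.2.1⟩, this.2.2⟩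

-- one zip scan, index-free characterization
theorem zip_all_iff (cs : List Char) (d : Nat) :
    (((cs.zip (cs.drop d)).all fun p => p.1 ≠ p.2) = true ↔
      ∀ k : Nat, k + d < cs.length → cs.getD k ' ' ≠ cs.getD (k + d) ' ') := by
  rw [List.all_eq_true]
  constructor
  · intro h k hk
    have hlen : k < (cs.zip (cs.drop d)).length := by
      simp [List.length_zip]; omega
    have hmem : (cs.zip (cs.drop d))[k] ∈ cs.zip (cs.drop d) := List.getElem_mem hlen
    have := h _ hmem
    simp only [List.getElem_zip, List.getElem_drop, decide_eq_true_eq] at this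
    have h1 : k < cs.length := by omega
    rw [List.getD_eq_getElem cs ' ' h1, List.getD_eq_getElem cs ' ' hk]
    simpa [Nat.add_comm d k] using this
  · intro h p hp
    obtain ⟨k, hlen, hget⟩ := List.mem_iff_getElem.mp hp
    have hk : k + d < cs.length := by
      simp [List.length_zip] at hlen; omega
    have h1 : k < cs.length := by omega
    have := h k hk
    rw [List.getD_eq_getElem cs ' ' h1, List.getD_eq_getElem cs ' ' hk] at this
    subst hget
    simp only [List.getElem_zip, List.getElem_drop, decide_eq_true_eq]
    simpa [Nat.add_comm d k] using this

theorem main_eq (cs : List Char) : pvA cs = pvB cs := by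
  by_cases hlen : cs.length < 3
  · have hB : pvB cs = true := by simp [pvB, hlen]
    rw [hB, portA_iff]
    intro k hk; omega
  · have hB : pvB cs =
        (((cs.zip (cs.drop 1)).all fun p => p.1 ≠ p.2) &&
         ((cs.zip (cs.drop 2)).all fun p => p.1 ≠ p.2)) := by
      rw [pvB, if_neg hlen]
    rw [hB]
    rcases Bool.eq_false_or_eq_true (pvA cs) with hA | hA
    all_goals rw [hA]
    · symm
      rw [Bool.and_eq_true, zip_all_iff, zip_all_iff]
      rw [portA_iff] at hA
      refine ⟨fun k hk => ?_, fun k hk => (hA k hk).2.2.symm⟩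
      by_cases h2 : k + 2 < cs.length
      · exact ((hA k h2).2.1).symm
      · have := (hA (k - 1) (by omega)).1
        have e : k - 1 + 2 = k + 1 := by omega
        have e' : k - 1 + 1 = k := by omega
        rw [e, e'] at this
        exact this.symm
    · symm
      rw [Bool.eq_false_iff]
      intro hc
      rw [Bool.and_eq_true, zip_all_iff, zip_all_iff] at hc
      obtain ⟨h1, h2⟩ := hc
      have : pvA cs = true := by
        rw [portA_iff]
        intro k hk
        exact ⟨(h1 (k + 1) (by omega)).symm, (h1 k (by omega)).symm, (h2 k hk).symm⟩
      simp [this] at hA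

-- ===== VERDICT (by name: the statement is the Claim_ definition above) =====
theorem check_if_string_is_happy_spec : Claim_equal_check_if_string_is_happy := by
  intro s _
  unfold Spec_check_if_string_is_happy check_if_string_is_happy check_if_string_is_happy_alt
  exact main_eq s.toList
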